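-- pv_equiv track=rewrite | github.com/AlexBuccheri/QcoreUtils | qcore_input_strings.py | atoms_string
-- ===== SOURCE A (Python) =====
-- def atoms_string(n_atoms: int, position_key: str) -> str:
--
--     """
--     Generate qcore 'atoms input string', with placeholders for species and positions.
--     To subsequently be processed with python's .replace()
--
--     Parameters
--     ----------
--      n_atoms : int
--         Number of atoms
--      position_key : str
--         Command key. Positions in 'xyz' or 'fractional'
--
--     Returns
--     -------
--     atoms_string : str
--         Returns fractional or xyz string of atomic species labels plus positions.
--
--     """
--
--     assert position_key in ['fractional', 'xyz']
--
--     # First line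
--     atoms_string = position_key + "= [['{X0:s}', {pos0:s}],\n"
--     indent = ' ' * (atoms_string.find('[') + 1)
--
--     if n_atoms == 1:
--         atoms_string = atoms_string.rstrip('\n')[:-1]
--         return atoms_string + "]\n"
--
--     if n_atoms > 2:
--         for ia in range(1, n_atoms - 1):
--             atoms_string += indent + "['{X" + str(ia) + ":s}', {pos" + str(ia) + ":s}],\n"
--
--     # End line
--     atoms_string += indent + "['{X" + str(n_atoms-1) + ":s}', {pos" + str(n_atoms-1) + ":s}]]\n"
--
--     return atoms_string
-- ===== SOURCE B (Python) =====
-- def atoms_string(n_atoms: int, position_key: str) -> str: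
--     assert position_key in ['fractional', 'xyz']
--     prefix = position_key + "= ["
--     indent = ' ' * len(prefix)
--     if n_atoms == 1:
--         indices = [0]
--     else:
--         indices = [0] + list(range(1, n_atoms - 1)) + [n_atoms - 1]
--     entries = ["['{X" + str(i) + ":s}', {pos" + str(i) + ":s}]" for i in indices]
--     return prefix + (',\n' + indent).join(entries) + ']\n'
-- ===== Notes on version B (the rewrite author's own statement) =====
-- stated objective: simpler
-- what changed: Replaces A's accumulate-and-patch construction (first line built then surgically rstripped/truncated for n_atoms==1, plus a middle loop appending ',\n'-terminated lines) by building the full index list once, mapping it to entry strings and joining them with ',\n'+indent, so no string surgery or trailing-separator bookkeeping is needed.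
import Mathlib
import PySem

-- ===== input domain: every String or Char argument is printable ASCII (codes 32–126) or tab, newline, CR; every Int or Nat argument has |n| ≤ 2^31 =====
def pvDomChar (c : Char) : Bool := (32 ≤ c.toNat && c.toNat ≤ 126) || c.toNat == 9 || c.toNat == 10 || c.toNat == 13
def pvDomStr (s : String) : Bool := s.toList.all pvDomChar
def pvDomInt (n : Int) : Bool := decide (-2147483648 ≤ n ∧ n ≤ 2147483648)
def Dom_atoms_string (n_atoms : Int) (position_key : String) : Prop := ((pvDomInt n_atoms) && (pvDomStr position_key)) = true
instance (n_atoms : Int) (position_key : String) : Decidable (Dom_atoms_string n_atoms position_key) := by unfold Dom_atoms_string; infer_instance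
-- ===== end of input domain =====

set_option maxHeartbeats 800000


-- B replaces A's accumulate-and-patch string building by an index-list/map/join construction; return values agree wherever A returns.

-- ===== PORT A =====
-- exact hand port of Python's s.rstrip('\n') (strip only '\n' chars from the right)
def pvRstripNl (s : String) : String :=
  String.ofList ((s.toList.reverse.dropWhile (· == '\n')).reverse)

def atoms_string (n_atoms : Int) (position_key : String) : String :=
  let s0 := position_key ++ "= [['{X0:s}', {pos0:s}],\n"
  let indent := String.ofList (List.replicate ((PySem.Str.find s0 "[") + 1).toNat ' ')
  if n_atoms = 1 then
    PySem.Str.slice (pvRstripNl s0) none (some (-1)) ++ "]\n"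
  else
    let s1 := if 2 < n_atoms then
      (PySem.List.pyRange 1 (n_atoms - 1) 1).foldl
        (fun acc ia => acc ++ indent ++ "['{X" ++ PySem.Int.toStr ia ++ ":s}', {pos" ++ PySem.Int.toStr ia ++ ":s}],\n") s0
    else s0
    s1 ++ indent ++ "['{X" ++ PySem.Int.toStr (n_atoms - 1) ++ ":s}', {pos" ++ PySem.Int.toStr (n_atoms - 1) ++ ":s}]]\n"

-- ===== PORT B =====
def atoms_string_alt (n_atoms : Int) (position_key : String) : String :=
  let pre := position_key ++ "= ["
  let indent := String.ofList (List.replicate (PySem.Str.len pre).toNat ' ')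
  let indices : List Int := if n_atoms = 1 then [0] else [0] ++ PySem.List.pyRange 1 (n_atoms - 1) 1 ++ [n_atoms - 1]
  let entries := indices.map (fun i => "['{X" ++ PySem.Int.toStr i ++ ":s}', {pos" ++ PySem.Int.toStr i ++ ":s}]")
  pre ++ PySem.Str.join (",\n" ++ indent) entries ++ "]\n"

-- ===== PRECONDITION & SPEC =====
-- Pre_ excludes exactly the inputs on which A's `assert position_key in ['fractional','xyz']` raises AssertionError.
def Pre_atoms_string (n_atoms : Int) (position_key : String) : Prop :=
  position_key = "fractional" ∨ position_key = "xyz"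
instance (n_atoms : Int) (position_key : String) : Decidable (Pre_atoms_string n_atoms position_key) := by
  unfold Pre_atoms_string; infer_instance
def pvWitness_atoms_string : Int × String := (2, "xyz")

def Spec_atoms_string (n_atoms : Int) (position_key : String) (out : String) : Prop := out = atoms_string_alt n_atoms position_key
instance (n_atoms : Int) (position_key : String) (out : String) : Decidable (Spec_atoms_string n_atoms position_key out) := by unfold Spec_atoms_string; infer_instance

-- ===== CLAIM (what is proved, stated in full; the proofs are below) =====
def Claim_equal_atoms_string : Prop := ∀ (n_atoms : Int) (position_key : String), Dom_atoms_string n_atoms position_key → Pre_atoms_string n_atoms position_key → Spec_atoms_string n_atoms position_key (atoms_string n_atoms position_key)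

-- ===== LEMMAS AND PROOFS =====

-- String-level cons lemmas for PySem.Str.join
theorem pvJoin_singleton (sep x : String) : PySem.Str.join sep [x] = x := by
  have h : (PySem.Str.join sep [x]).toList = x.toList := by
    simp [PySem.Str.toList_join, PySem.Chars.join_singleton]
  exact String.toList_injective h

theorem pvJoin_cons_cons (sep x y : String) (l : List String) :
    PySem.Str.join sep (x :: y :: l) = x ++ sep ++ PySem.Str.join sep (y :: l) := by
  have h : (PySem.Str.join sep (x :: y :: l)).toList = (x ++ sep ++ PySem.Str.join sep (y :: l)).toList := by
    simp [PySem.Str.toList_join, PySem.Chars.join_cons_cons]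
  exact String.toList_injective h

-- master lemma: A's fold-with-trailing-commas equals B's join-with-leading-separators
theorem pvMaster (ind : String) (e : Int → String) (last : String) :
    ∀ (l : List Int) (p e0 : String),
    (l.foldl (fun acc i => acc ++ ind ++ e i ++ ",\n") (p ++ e0 ++ ",\n")) ++ ind ++ last ++ "]\n"
      = p ++ PySem.Str.join (",\n" ++ ind) (e0 :: (l.map e ++ [last])) ++ "]\n" := by
  intro l
  induction l with
  | nil =>
    intro p e0
    simp [pvJoin_cons_cons, pvJoin_singleton, String.append_assoc]
  | cons i l ih =>
    intro p e0
    have h1 : (p ++ e0 ++ ",\n") ++ ind ++ e i ++ ",\n"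
        = ((p ++ e0 ++ ",\n" ++ ind) ++ e i ++ ",\n") := by
      simp [String.append_assoc]
    calc (List.foldl (fun acc j => acc ++ ind ++ e j ++ ",\n") ((p ++ e0 ++ ",\n")) (i :: l)) ++ ind ++ last ++ "]\n"
        = (List.foldl (fun acc j => acc ++ ind ++ e j ++ ",\n") ((p ++ e0 ++ ",\n" ++ ind) ++ e i ++ ",\n") l) ++ ind ++ last ++ "]\n" := by
          rw [List.foldl_cons, h1]
      _ = (p ++ e0 ++ ",\n" ++ ind) ++ PySem.Str.join (",\n" ++ ind) (e i :: (l.map e ++ [last])) ++ "]\n" := ih _ _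
      _ = p ++ PySem.Str.join (",\n" ++ ind) (e0 :: ((i :: l).map e ++ [last])) ++ "]\n" := by
          simp [pvJoin_cons_cons, String.append_assoc]

-- the key case: both ports for n ≠ 1, with the indent already evaluated to a literal
theorem pvCase (key ind : String) (n : Int) (hn : n ≠ 1)
    (hA : atoms_string n key =
      (if 2 < n then
        (PySem.List.pyRange 1 (n - 1) 1).foldl
          (fun acc ia => acc ++ ind ++ "['{X" ++ PySem.Int.toStr ia ++ ":s}', {pos" ++ PySem.Int.toStr ia ++ ":s}],\n")
          (key ++ "= [['{X0:s}', {pos0:s}],\n")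
       else (key ++ "= [['{X0:s}', {pos0:s}],\n"))
       ++ ind ++ "['{X" ++ PySem.Int.toStr (n - 1) ++ ":s}', {pos" ++ PySem.Int.toStr (n - 1) ++ ":s}]]\n")
    (hB : atoms_string_alt n key =
      (key ++ "= [") ++ PySem.Str.join (",\n" ++ ind)
        (((([0] : List Int) ++ PySem.List.pyRange 1 (n - 1) 1 ++ [n - 1]).map
          (fun i => "['{X" ++ PySem.Int.toStr i ++ ":s}', {pos" ++ PySem.Int.toStr i ++ ":s}]"))) ++ "]\n")
    (hkey : key ++ "= [['{X0:s}', {pos0:s}],\n" = (key ++ "= [") ++ "['{X0:s}', {pos0:s}]" ++ ",\n") :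
    atoms_string n key = atoms_string_alt n key := by
  set e : Int → String := fun i => "['{X" ++ PySem.Int.toStr i ++ ":s}', {pos" ++ PySem.Int.toStr i ++ ":s}]" with he
  have he0 : e 0 = "['{X0:s}', {pos0:s}]" := by simp only [he]; decide
  have hsplit1 : (":s}],\n" : String) = ":s}]" ++ ",\n" := by decide
  have hsplit2 : (":s}]]\n" : String) = ":s}]" ++ "]\n" := by decide
  have hkey' : key ++ "= [['{X0:s}', {pos0:s}],\n" = (key ++ "= [") ++ e 0 ++ ",\n" := by
    rw [hkey, he0]
  rw [hA, hB]
  by_cases h2 : 2 < n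
  · rw [if_pos h2, hkey']
    have hm := pvMaster ind e (e (n - 1)) (PySem.List.pyRange 1 (n - 1) 1) (key ++ "= [") (e 0)
    simp only [List.map_append, List.map_cons, List.map_nil, List.cons_append, List.nil_append, List.append_nil] at hm ⊢
    rw [← hm]
    simp only [he, hsplit1, hsplit2, String.append_assoc]
  · rw [if_neg h2]
    have hnil : PySem.List.pyRange 1 (n - 1) 1 = [] := PySem.List.pyRange_one_eq_nil (by omega)
    have hm := pvMaster ind e (e (n - 1)) ([] : List Int) (key ++ "= [") (e 0)
    rw [List.foldl_nil] at hm
    rw [hkey', hnil]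
    simp only [List.map_append, List.map_cons, List.map_nil, List.cons_append, List.nil_append, List.append_nil] at hm ⊢
    rw [← hm]
    simp only [he, hsplit1, hsplit2, String.append_assoc]

-- per-key instantiation: evaluate the literal indent and hand everything to pvCase
theorem pvKeyCase (n : Int) (h1 : n ≠ 1) (key ind : String)
    (hind : String.ofList (List.replicate ((PySem.Str.find (key ++ "= [['{X0:s}', {pos0:s}],\n") "[") + 1).toNat ' ') = ind)
    (hlen : String.ofList (List.replicate (PySem.Str.len (key ++ "= [")).toNat ' ') = ind)
    (hkey : key ++ "= [['{X0:s}', {pos0:s}],\n" = (key ++ "= [") ++ "['{X0:s}', {pos0:s}]" ++ ",\n") :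
    atoms_string n key = atoms_string_alt n key := by
  refine pvCase key ind n h1 ?_ ?_ hkey
  · simp only [atoms_string, hind, if_neg h1]
  · simp only [atoms_string_alt, hlen, if_neg h1]

-- ===== VERDICT (by name: the statement is the Claim_ definition above) =====
theorem atoms_string_spec : Claim_equal_atoms_string := by
  intro n key _ hpre
  unfold Spec_atoms_string
  by_cases h1 : n = 1
  · subst h1
    rcases hpre with h | h <;> subst h <;> decide
  · rcases hpre with h | h <;> subst h
    · exact pvKeyCase n h1 "fractional" "             " (by decide) (by decide) (by decide)
    · exact pvKeyCase n h1 "xyz" "      " (by decide) (by decide) (by decide)
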